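-- pv_equiv track=rewrite | github.com/mdiazv/codejam | 2020/qual/e/e-small.py | min_perm
-- ===== SOURCE A (Python) =====
-- def min_perm(N, K):
--     P = [1] * N
--     need = K - N
--     i = 0
--     while i < N and need > 0:
--         P[i] = min(need+1, N)
--         need = need + 1 - P[i]
--         i += 1
--     return list(reversed(P))
-- ===== SOURCE B (Python) =====
-- def min_perm(N, K):
--     if N < 2:
--         return [1] * N
--     extra = max(K - N, 0)
--     full = min(extra // (N - 1), N)
--     rem = extra - full * (N - 1)
--     P = [N] * full
--     if full < N and rem > 0:
--         P.append(rem + 1)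
--     P += [1] * (N - len(P))
--     return list(reversed(P))
-- ===== Notes on version B (the rewrite author's own statement) =====
-- stated objective: simpler
-- what changed: Replaces A's greedy while-loop that distributes the surplus K-N slot by slot with a direct quotient/remainder closed form: full = min((K-N)//(N-1), N) slots get N, one optional slot gets the remainder+1, the rest are 1.
import Mathlib
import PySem

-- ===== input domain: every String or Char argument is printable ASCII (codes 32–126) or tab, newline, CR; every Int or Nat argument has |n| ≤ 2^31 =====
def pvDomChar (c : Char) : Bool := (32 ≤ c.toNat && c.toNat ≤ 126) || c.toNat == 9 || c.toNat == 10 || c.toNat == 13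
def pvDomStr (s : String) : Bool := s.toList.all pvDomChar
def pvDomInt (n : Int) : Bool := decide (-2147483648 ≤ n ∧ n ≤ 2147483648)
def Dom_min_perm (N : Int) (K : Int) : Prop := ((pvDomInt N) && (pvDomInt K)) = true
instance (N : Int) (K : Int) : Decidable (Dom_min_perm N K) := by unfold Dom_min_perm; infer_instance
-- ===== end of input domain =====

-- B replaces A's greedy while-loop by a closed-form quotient/remainder construction (simpler; no claim of speed).

-- B replaces A's greedy while-loop with a closed-form quotient/remainder construction (simpler decomposition; no speed claim).

-- ===== PORT A =====
-- the while loop of A: state (P, need, i)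
def minPermLoop (N : Int) (P : List Int) (need : Int) (i : Int) : List Int :=
  if h : i < N ∧ 0 < need then
    let v := min (need + 1) N
    minPermLoop N (P.set i.toNat v) (need + 1 - v) (i + 1)
  else P
termination_by (N - i).toNat
decreasing_by omega


def min_perm (N : Int) (K : Int) : List Int :=
  let P := List.replicate N.toNat 1
  (minPermLoop N P (K - N) 0).reverse

-- ===== PORT B =====
def min_perm_alt (N : Int) (K : Int) : List Int :=
  if N < 2 then List.replicate N.toNat 1
  else
    let extra := max (K - N) 0
    let full := min (PySem.Int.floordiv extra (N - 1)) N
    let rem := extra - full * (N - 1)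
    let P := List.replicate full.toNat N
    let P := if full < N ∧ 0 < rem then P ++ [rem + 1] else P
    let P := P ++ List.replicate (N - (P.length : Int)).toNat 1
    P.reverse


-- ===== PRECONDITION & SPEC =====
def Spec_min_perm (N : Int) (K : Int) (out : List Int) : Prop := out = min_perm_alt N K
instance (N : Int) (K : Int) (out : List Int) : Decidable (Spec_min_perm N K out) := by unfold Spec_min_perm; infer_instance

-- ===== CLAIM (what is proved, stated in full; the proofs are below) =====
def Claim_equal_min_perm : Prop := ∀ (N : Int) (K : Int), Dom_min_perm N K → Spec_min_perm N K (min_perm N K)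

-- ===== LEMMAS AND PROOFS =====
-- closed form of the tail the loop writes from position i on (m = N - i slots remain)
def buildTail (N : Int) (m : Int) (extra : Int) : List Int :=
  let full := min (extra / (N - 1)) m
  let rem := extra - full * (N - 1)
  let app := full < m ∧ 0 < rem
  List.replicate full.toNat N ++ (if app then [rem + 1] else [])
    ++ List.replicate (m - full - (if app then 1 else 0)).toNat 1

lemma buildTail_zero (N m : Int) (hm : 0 ≤ m) : buildTail N m 0 = List.replicate m.toNat 1 := by
  unfold buildTail
  rw [show min ((0:Int) / (N-1)) m = 0 by rw [Int.zero_ediv]; omega]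
  simp

lemma buildTail_step (N m e : Int) (hN : 2 ≤ N) (hm : 0 < m) (he : 0 < e) :
    buildTail N m e
      = min (e + 1) N :: buildTail N (m - 1) (max (e + 1 - min (e + 1) N) 0) := by
  by_cases hc : N - 1 ≤ e
  · -- full slot: value N
    rw [show min (e + 1) N = N by omega,
        show max (e + 1 - N) 0 = e - (N - 1) by omega]
    have hdiv : (e - (N - 1)) / (N - 1) = e / (N - 1) - 1 := by
      have h := Int.add_mul_ediv_right e (-1) (show N - 1 ≠ 0 by omega)
      rw [show e + -1 * (N - 1) = e - (N - 1) by ring] at h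
      omega
    have hq1 : 1 ≤ e / (N - 1) :=
      (Int.le_ediv_iff_mul_le (by omega)).mpr (by omega)
    unfold buildTail
    dsimp only
    rw [hdiv, show min (e / (N - 1) - 1) (m - 1) = min (e / (N - 1)) m - 1 by omega]
    set f := min (e / (N - 1)) m with hf
    have hf1 : 1 ≤ f := by omega
    rw [show e - (N - 1) - (f - 1) * (N - 1) = e - f * (N - 1) by ring]
    simp only [show ((f - 1 < m - 1 ∧ 0 < e - f * (N - 1)) ↔ (f < m ∧ 0 < e - f * (N - 1))) by omega]
    rw [show (m - 1 - (f - 1) : Int) = m - f by ring]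
    rw [show f.toNat = (f - 1).toNat + 1 by omega, List.replicate_succ]
    simp
  · -- partial slot: value e+1, remainder becomes 0
    rw [show min (e + 1) N = e + 1 by omega,
        show max (e + 1 - (e + 1)) 0 = 0 by omega,
        buildTail_zero _ _ (by omega)]
    unfold buildTail
    dsimp only
    rw [Int.ediv_eq_zero_of_lt (by omega) (by omega),
        show min (0:Int) m = 0 by omega]
    simp only [Int.toNat_zero, List.replicate_zero, zero_mul, sub_zero]
    simp only [if_pos (⟨hm, he⟩ : 0 < m ∧ 0 < e)]
    rfl

lemma minPermLoop_eq (N : Int) (hN : 2 ≤ N) :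
    ∀ (n : Nat) (i : Int), (N - i).toNat = n → 0 ≤ i → i ≤ N →
    ∀ (P : List Int) (need : Int),
    (P.length : Int) = N → P.drop i.toNat = List.replicate (N - i).toNat 1 →
    minPermLoop N P need i = P.take i.toNat ++ buildTail N (N - i) (max need 0) := by
  intro n
  induction n with
  | zero =>
    intro i hn hi hiN P need hlen hdrop
    have hiN' : i = N := by omega
    rw [minPermLoop, dif_neg (by omega)]
    unfold buildTail
    dsimp only
    rw [show N - i = 0 by omega]
    rw [show min (max need 0 / (N - 1)) 0 = 0 by
      have : 0 ≤ max need 0 / (N - 1) := Int.ediv_nonneg (by omega) (by omega)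
      omega]
    simp only [Int.toNat_zero, List.replicate_zero, zero_mul, sub_zero,
      lt_self_iff_false, false_and, if_false, List.append_nil]
    rw [List.take_of_length_le (by omega)]
  | succ n ih =>
    intro i hn hi hiN P need hlen hdrop
    have hiltN : i < N := by omega
    have hitn : i.toNat < P.length := by omega
    rw [minPermLoop]
    by_cases hneed : 0 < need
    · rw [dif_pos ⟨hiltN, hneed⟩]
      set v := min (need + 1) N with hv
      have hdrop' : (P.set i.toNat v).drop (i + 1).toNat = List.replicate (N - (i + 1)).toNat 1 := by
        rw [show (i + 1).toNat = i.toNat + 1 by omega]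
        rw [List.set_eq_take_cons_drop v hitn]
        rw [List.drop_append]
        rw [List.length_take]
        have h1 : (i.toNat + 1) - min i.toNat P.length = 1 := by omega
        rw [List.drop_of_length_le (by simp), h1]
        have h2 := congrArg (List.drop 1) hdrop
        rw [List.drop_drop] at h2
        simp only [List.nil_append, List.drop_succ_cons, List.drop_zero] at h2 ⊢
        rw [h2]
        rw [List.drop_replicate]
        congr 1
        omega
      have hres := ih (i + 1) (by omega) (by omega) (by omega) (P.set i.toNat v)
        (need + 1 - v) (by simpa using hlen) hdrop'
      rw [hres]
      have htake : (P.set i.toNat v).take ((i + 1).toNat) = P.take i.toNat ++ [v] := by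
        rw [show (i + 1).toNat = i.toNat + 1 by omega]
        rw [List.set_eq_take_cons_drop v hitn]
        rw [List.take_append, List.length_take]
        rw [List.take_of_length_le (by simp)]
        have h1 : (i.toNat + 1) - min i.toNat P.length = 1 := by omega
        rw [h1]
        simp
      rw [htake]
      rw [show max need 0 = need by omega]
      rw [buildTail_step N (N - i) need hN (by omega) hneed]
      rw [show N - (i + 1) = N - i - 1 by ring]
      rw [show max (need + 1 - v) 0 = need + 1 - v by omega]
      simp [List.append_assoc, hv]
    · rw [dif_neg (by omega)]
      rw [show max need 0 = 0 by omega, buildTail_zero _ _ (by omega)]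
      conv_lhs => rw [← List.take_append_drop i.toNat P]
      rw [hdrop]


theorem min_perm_eq (N K : Int) : min_perm N K = min_perm_alt N K := by
  by_cases h2 : 2 ≤ N
  · have hmain := minPermLoop_eq N h2 (N - 0).toNat 0 rfl le_rfl (by omega)
      (List.replicate N.toNat 1) (K - N) (by simp; omega)
      (by simp)
    unfold min_perm
    dsimp only
    rw [hmain]
    unfold min_perm_alt
    rw [if_neg (by omega)]
    dsimp only
    rw [PySem.Int.floordiv_eq_ediv_of_pos (by omega)]
    rw [show N - 0 = N by ring]
    unfold buildTail
    dsimp only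
    set e := max (K - N) 0 with he
    set f := min (e / (N - 1)) N with hf
    have hf0 : 0 ≤ f := by
      have : 0 ≤ e / (N - 1) := Int.ediv_nonneg (by omega) (by omega)
      omega
    by_cases happ : f < N ∧ 0 < e - f * (N - 1)
    · simp only [if_pos happ]
      rw [show ((((List.replicate f.toNat N ++ [e - f * (N - 1) + 1]).length : Nat) : Int))
            = f + 1 by simp [Int.toNat_of_nonneg hf0]]
      rw [show (N - (f + 1) : Int) = N - f - 1 by ring]
      simp [List.append_assoc]
    · simp only [if_neg happ]
      rw [show (((List.replicate f.toNat N).length : Nat) : Int) = f by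
            simp [Int.toNat_of_nonneg hf0]]
      rw [show (N - f - (0:Int)) = N - f by ring]
      simp
  · by_cases h1 : N = 1
    · subst h1
      unfold min_perm min_perm_alt
      rw [if_pos (by omega)]
      dsimp only
      rw [minPermLoop]
      by_cases hK : 0 < K - 1
      · rw [dif_pos ⟨by omega, hK⟩]
        rw [show min (K - 1 + 1) 1 = 1 by omega]
        rw [minPermLoop, dif_neg (by omega)]
        simp
      · rw [dif_neg (by omega)]
        simp
    · have h0 : N.toNat = 0 := by omega
      unfold min_perm min_perm_alt
      rw [if_pos (by omega), h0]
      dsimp only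
      rw [minPermLoop, dif_neg (by omega)]
      simp

-- ===== VERDICT (by name: the statement is the Claim_ definition above) =====
theorem min_perm_spec : Claim_equal_min_perm := by
  intro N K _
  exact min_perm_eq N K
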